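-- pv_equiv track=rewrite | github.com/zzg-club/yeji-python | itscote/greedy/mukbang_live.py | solution
-- ===== SOURCE A (Python) =====
-- def solution(food_times, k):
--     n = len(food_times)
--     idx = 0
--     for i in range(k):
--         count = 0
--         while food_times[idx] == 0:
--             if idx == n-1: idx = 0
--             else: idx += 1
--             count += 1
--
--         food_times[idx] -= 1
--
--         if count == n:
--             return -1
--
--         if idx == n-1: idx = 0
--         else: idx += 1
--
--     count = 0
--     while food_times[idx] == 0:
--         if idx == n-1: idx = 0
--         else: idx += 1
--         count += 1
--         if count == n:
--             return -1
--
--     return idx + 1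
-- ===== SOURCE B (Python) =====
-- def solution(food_times, k):
--     # Bulk lap consumption: eat q whole laps over the surviving foods at a time
--     # (q = as many laps as fit before some timer reaches zero, capped at k // m),
--     # then answer the remaining k < m seconds by indexing the survivor list.
--     t = list(food_times)
--     while True:
--         alive = [i for i, x in enumerate(t) if x != 0]
--         if not alive:
--             return -1
--         m = len(alive)
--         if k < m:
--             return alive[k] + 1
--         q = min([x for x in t if x > 0] + [k // m])
--         t = [x - q if x != 0 else x for x in t]
--         k -= q * m
-- ===== Notes on version B (the rewrite author's own statement) =====
-- stated objective: alternative
-- what changed: B replaces A's second-by-second rotating-pointer simulation with bulk lap arithmetic: it lists the surviving (non-zero) foods, eats q whole laps at once (q = min of the positive timers and k//m), and answers the final partial lap by indexing the survivor list; Pre_ excludes the empty list and the inputs where A's zero-skip loop spins forever (A does not return there), and negative k, a malformed duration outside the task's natural domain on which B's survivor indexing would wrap or raise; …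
-- outside the precondition, e.g. on solution([3, 1, 2], -1): A returns 1, B returns 3; on solution([1, 2], -5): A returns 1, B raises IndexError
import Mathlib
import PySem

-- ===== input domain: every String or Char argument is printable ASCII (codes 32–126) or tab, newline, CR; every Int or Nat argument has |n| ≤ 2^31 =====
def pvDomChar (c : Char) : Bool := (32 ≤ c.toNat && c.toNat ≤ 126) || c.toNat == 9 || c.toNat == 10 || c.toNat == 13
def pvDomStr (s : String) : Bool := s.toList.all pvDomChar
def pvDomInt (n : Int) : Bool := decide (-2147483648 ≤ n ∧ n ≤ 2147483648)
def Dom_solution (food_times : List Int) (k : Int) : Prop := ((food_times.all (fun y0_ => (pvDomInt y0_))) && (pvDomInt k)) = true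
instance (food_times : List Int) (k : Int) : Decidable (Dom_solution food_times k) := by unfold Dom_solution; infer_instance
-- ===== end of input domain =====

-- B consumes whole laps over the surviving foods in bulk instead of A's second-by-second
-- pointer walk; A mutates food_times in place, B does not (the equivalence proved is about
-- the return value only).

-- ===== PORT A =====
-- A's source mutates food_times; the port threads the list through the loop state.

-- 'if idx == n-1: idx = 0 else: idx += 1'
def pyNext (n idx : Nat) : Nat := if idx = n - 1 then 0 else idx + 1

-- the for-loop's inner 'while food_times[idx] == 0' (zero-skip); fuel-bounded: in Python this
-- loop diverges when every entry is zero (excluded by Pre_), 'none' marks that fuel ran out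
def skipA (t : List Int) (n : Nat) : Nat → Nat → Nat → Option (Nat × Nat)
  | 0, _, _ => none
  | f+1, idx, count =>
    if t.getD idx 0 = 0 then skipA t n f (pyNext n idx) (count+1) else some (idx, count)

inductive ASt where
  | run : List Int → Nat → ASt   -- (food_times, idx)
  | neg1 : ASt                  -- 'return -1' taken inside the for-loop
  | stuck : ASt                 -- fuel exhausted = Python diverges (outside Pre_)
deriving DecidableEq, Repr

-- one iteration of 'for i in range(k)'
def stepA (n : Nat) (st : ASt) : ASt :=
  match st with
  | .run t idx =>
    match skipA t n (n+1) idx 0 with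
    | none => .stuck
    | some (j, count) =>
      let t' := t.set j (t.getD j 0 - 1)
      if count = n then .neg1 else .run t' (pyNext n j)
  | s => s

-- the trailing 'while food_times[idx] == 0: … if count == n: return -1' then 'return idx + 1';
-- fuel n+1 suffices because count reaches n after n iterations (0 returned only with fuel out,
-- which Python reaches only by raising/diverging on the empty list, excluded by Pre_)
def tailA (t : List Int) (n : Nat) : Nat → Nat → Nat → Int
  | 0, _, _ => 0
  | f+1, idx, count =>
    if t.getD idx 0 = 0 then
      (if count + 1 = n then -1 else tailA t n f (pyNext n idx) (count + 1))
    else (idx : Int) + 1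

def solution (food_times : List Int) (k : Int) : Int :=
  let n := food_times.length
  match (List.range k.toNat).foldl (fun st _ => stepA n st) (ASt.run food_times 0) with
  | .neg1 => -1
  | .stuck => 0
  | .run t idx => tailA t n (n+1) idx 0

-- ===== PORT B =====
-- facts cited by altLoop's decreasing_by (the bulk step strictly shrinks k)
theorem alt_fd_ge_one (k m : Int) (hm : 0 < m) (hk : m ≤ k) : 1 ≤ PySem.Int.floordiv k m := by
  rw [PySem.Int.le_floordiv_iff_mul_le hm]; omega

theorem alt_fd_mul_le (k m : Int) (hm : 0 < m) : PySem.Int.floordiv k m * m ≤ k := by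
  have h := PySem.Int.floordiv_mul_add_mod k m
  have h2 : 0 ≤ PySem.Int.mod k m := by
    rw [PySem.Int.mod_eq_emod_of_pos hm]; exact Int.emod_nonneg k (by omega)
  omega

-- the value chosen by B's 'q = min([x for x in t if x > 0] + [k // m])' is ≥ 1 and q*m ≤ k
theorem alt_q_facts (pos : List Int) (k m : Int) (hm : 0 < m) (hk : m ≤ k)
    (hpos : ∀ x ∈ pos, 0 < x) :
    1 ≤ (PySem.List.min? (pos ++ [PySem.Int.floordiv k m]) (fun x => x)).getD 0 ∧
    (PySem.List.min? (pos ++ [PySem.Int.floordiv k m]) (fun x => x)).getD 0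
      ≤ PySem.Int.floordiv k m := by
  obtain ⟨v, hv⟩ : ∃ v, PySem.List.min? (pos ++ [PySem.Int.floordiv k m]) (fun x => x)
      = some v := by
    cases h : PySem.List.min? (pos ++ [PySem.Int.floordiv k m]) (fun x => x) with
    | none => simp [PySem.List.min?_eq_none_iff] at h
    | some v => exact ⟨v, rfl⟩
  have hmem := PySem.List.min?_mem hv
  have hfd1 := alt_fd_ge_one k m hm hk
  have hle : v ≤ PySem.Int.floordiv k m :=
    PySem.List.min?_isMin hv _ (by simp)
  rw [hv]
  refine ⟨?_, by simpa using hle⟩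
  rcases List.mem_append.mp hmem with h | h
  · have := hpos v h; simpa using this
  · simp at h; simp [h]; omega

theorem altLoop_dec2 (t : List Int) (k m : Int) (hm : 0 < m)
    (h1 : m ≤ k) :
    (k - (PySem.List.min? (t.filter (fun x => 0 < x) ++ [PySem.Int.floordiv k m])
        (fun x => x)).getD 0 * m).toNat < k.toNat := by
  have hpos : ∀ x ∈ t.filter (fun x => 0 < x), 0 < x := fun x hx => by
    simpa using (List.mem_filter.mp hx).2
  obtain ⟨hq1, hqfd⟩ := alt_q_facts (t.filter (fun x => 0 < x)) k m hm h1 hpos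
  have hqk : (PySem.List.min? (t.filter (fun x => 0 < x) ++ [PySem.Int.floordiv k m])
      (fun x => x)).getD 0 * m ≤ k :=
    le_trans (mul_le_mul_of_nonneg_right hqfd hm.le) (alt_fd_mul_le k m hm)
  have h2 : 1 ≤ (PySem.List.min? (t.filter (fun x => 0 < x) ++ [PySem.Int.floordiv k m])
      (fun x => x)).getD 0 * m := by nlinarith
  generalize (PySem.List.min? (t.filter (fun x => 0 < x) ++ [PySem.Int.floordiv k m])
      (fun x => x)).getD 0 * m = P at *
  omega

def altLoop (t : List Int) (k : Int) : Int :=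
  let act : List Int :=
    (PySem.List.enumerate t 0).filterMap (fun p => if p.2 ≠ 0 then some p.1 else none)
  if h0 : act = [] then -1
  else
    let m : Int := act.length
    if h1 : k < m then (PySem.List.pyGet? act k).getD 0 + 1
    else
      let q := (PySem.List.min? (t.filter (fun x => 0 < x) ++ [PySem.Int.floordiv k m])
        (fun x => x)).getD 0
      altLoop (t.map (fun x => if x ≠ 0 then x - q else x)) (k - q * m)
termination_by k.toNat
decreasing_by
  have hun : (List.filter (fun (x : {x // x ∈ t}) => decide (0 < (x : Int))) t.attach).unattach
      = t.filter (fun x => decide (0 < x)) := by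
    rw [List.unattach_filter (g := fun x => decide (0 < x)) (hf := fun x h => rfl),
      List.unattach_attach]
  rw [hun]
  exact altLoop_dec2 t k _ (by exact_mod_cast List.length_pos_iff.mpr h0) (not_lt.mp h1)

def solution_alt (food_times : List Int) (k : Int) : Int := altLoop food_times k

-- ===== PRECONDITION & SPEC =====
def sumPos (t : List Int) : Int := (t.filter (fun x => 0 < x)).sum

-- Pre_ excludes the inputs on which Python A does not return — the empty list (IndexError) and,
-- when no entry is negative, k greater than the total positive food (the zero-skip loop spins
-- forever) — and negative k, a malformed duration outside the task's natural domain, on which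
-- B's survivor indexing would wrap or raise.
def Pre_solution (food_times : List Int) (k : Int) : Prop :=
  food_times ≠ [] ∧ 0 ≤ k ∧ ((∃ x ∈ food_times, x < 0) ∨ k ≤ sumPos food_times)
instance (food_times : List Int) (k : Int) : Decidable (Pre_solution food_times k) := by
  unfold Pre_solution; infer_instance
def pvWitness_solution : List Int × Int := ([3, 1, 2], 5)

def Spec_solution (food_times : List Int) (k : Int) (out : Int) : Prop :=
  out = solution_alt food_times k
instance (food_times : List Int) (k : Int) (out : Int) : Decidable (Spec_solution food_times k out) := by
  unfold Spec_solution; infer_instance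

-- ===== CLAIM (what is proved, stated in full; the proofs are below) =====
def Claim_equal_solution : Prop := ∀ (food_times : List Int) (k : Int),
  Dom_solution food_times k → Pre_solution food_times k →
  Spec_solution food_times k (solution food_times k)
-- ===== LEMMAS AND PROOFS =====

-- proof-side vocabulary
def acts (t : List Int) : List Nat := (List.range t.length).filter (fun i => t.getD i 0 ≠ 0)
def dec1 (t : List Int) : List Int := t.map (fun x => if x ≠ 0 then x - 1 else x)
def decQN (t : List Int) (j : Nat) : List Int := t.map (fun x => if x ≠ 0 then x - (j : Int) else x)
def decP (t : List Int) (j : Nat) : List Int :=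
  t.mapIdx (fun i x => if i ∈ (acts t).take j then x - 1 else x)
def ptrA (t : List Int) (j : Nat) : Nat :=
  if j = 0 then 0 else pyNext t.length ((acts t).getD (j-1) 0)

-- the reference round-by-round recursion both ports are proved equal to
def rounds (t : List Int) (k : Int) : Int :=
  if h0 : acts t = [] then -1
  else if k < ((acts t).length : Int) then ((acts t).getD k.toNat 0 : Int) + 1
  else rounds (dec1 t) (k - (acts t).length)
termination_by k.toNat
decreasing_by
  have : 0 < (acts t).length := List.length_pos_iff.mpr h0
  omega

theorem foldl_range_eq_iterate (f : ASt → ASt) (j : Nat) (st : ASt) :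
    (List.range j).foldl (fun s _ => f s) st = f^[j] st := by
  induction j with
  | zero => rfl
  | succ j ih => rw [List.range_succ, List.foldl_append, ih, Function.iterate_succ_apply']; rfl

theorem mem_acts (t : List Int) (i : Nat) : i ∈ acts t ↔ i < t.length ∧ t.getD i 0 ≠ 0 := by
  simp [acts, List.mem_filter]

theorem acts_pairwise (t : List Int) : (acts t).Pairwise (· < ·) :=
  List.Pairwise.filter _ (List.pairwise_lt_range)

theorem acts_mono (t : List Int) {r s : Nat} (hr : r < s) (hs : s < (acts t).length) :
    (acts t).getD r 0 < (acts t).getD s 0 := by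
  have h := (List.pairwise_iff_getElem).mp (acts_pairwise t) r s (lt_trans hr hs) hs hr
  rwa [List.getD_eq_getElem _ _ (lt_trans hr hs), List.getD_eq_getElem _ _ hs]

theorem acts_elem_lt (t : List Int) {j : Nat} (hj : j < (acts t).length) :
    (acts t).getD j 0 < t.length := by
  have : (acts t).getD j 0 ∈ acts t := by
    rw [List.getD_eq_getElem _ _ hj]; exact List.getElem_mem hj
  exact ((mem_acts t _).mp this).1

theorem acts_elem_ne (t : List Int) {j : Nat} (hj : j < (acts t).length) :
    t.getD ((acts t).getD j 0) 0 ≠ 0 := by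
  have : (acts t).getD j 0 ∈ acts t := by
    rw [List.getD_eq_getElem _ _ hj]; exact List.getElem_mem hj
  exact ((mem_acts t _).mp this).2

theorem acts_notmem_zero (t : List Int) {i : Nat} (hi : i < t.length) (h : i ∉ acts t) :
    t.getD i 0 = 0 := by
  by_contra hne
  exact h ((mem_acts t i).mpr ⟨hi, hne⟩)

-- an index below acts[j] that is in acts sits at a position below j
theorem acts_below (t : List Int) {i j : Nat} (hj : j < (acts t).length)
    (hi : i ∈ acts t) (hlt : i < (acts t).getD j 0) : ∃ r, r < j ∧ (acts t).getD r 0 = i := by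
  obtain ⟨r, hr, hri⟩ := List.mem_iff_getElem.mp hi
  by_cases hrj : r < j
  · exact ⟨r, hrj, by rw [List.getD_eq_getElem _ _ hr]; exact hri⟩
  · exfalso
    push_neg at hrj
    have hle : (acts t).getD j 0 ≤ (acts t).getD r 0 := by
      rcases eq_or_lt_of_le hrj with h | h
      · rw [h]
      · exact le_of_lt (acts_mono t h hr)
    rw [List.getD_eq_getElem _ _ hr, hri] at hle
    omega

theorem pyNext_lt {n x : Nat} (hn : 0 < n) (hx : x < n) : pyNext n x < n := by
  unfold pyNext; split <;> omega

-- decP basics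
theorem decP_length (t : List Int) (j : Nat) : (decP t j).length = t.length := by
  simp [decP]

theorem decP_getD (t : List Int) (j : Nat) {i : Nat} (hi : i < t.length) :
    (decP t j).getD i 0 = if i ∈ (acts t).take j then t.getD i 0 - 1 else t.getD i 0 := by
  rw [List.getD_eq_getElem _ _ (by rw [decP_length]; exact hi), List.getD_eq_getElem _ _ hi]
  simp [decP]

theorem mem_take_acts (t : List Int) {i j : Nat} :
    i ∈ (acts t).take j ↔ ∃ r, r < j ∧ r < (acts t).length ∧ (acts t).getD r 0 = i := by
  rw [List.mem_take_iff_getElem]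
  constructor
  · rintro ⟨r, hr, hv⟩
    have h1 : r < j := lt_of_lt_of_le hr (min_le_left _ _)
    have h2 : r < (acts t).length := lt_of_lt_of_le hr (min_le_right _ _)
    exact ⟨r, h1, h2, by rw [List.getD_eq_getElem _ _ h2]; exact hv⟩
  · rintro ⟨r, h1, h2, h3⟩
    exact ⟨r, lt_min h1 h2, by rw [← List.getD_eq_getElem _ _ h2]; exact h3⟩

theorem decP_zero (t : List Int) : decP t 0 = t := by
  apply List.ext_getElem (decP_length t 0)
  intro i h1 h2
  simp [decP]

theorem acts_elem_notmem_take (t : List Int) {j j' : Nat} (hj : j ≤ j')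
    (hj' : j' < (acts t).length) : (acts t).getD j' 0 ∉ (acts t).take j := by
  intro hmem
  obtain ⟨r, hr, hrl, hrv⟩ := (mem_take_acts t).mp hmem
  have hrj : r < j' := lt_of_lt_of_le hr hj
  have := acts_mono t hrj hj'
  omega

-- skip/tail loop characterizations
theorem skip_reach (u : List Int) (n : Nat) (hn : n = u.length) :
    ∀ (f p c j : Nat), p ≤ j → j < n → (∀ i, p ≤ i → i < j → u.getD i 0 = 0) →
    u.getD j 0 ≠ 0 → j - p < f → skipA u n f p c = some (j, c + (j - p)) := by
  intro f
  induction f with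
  | zero => intro p c j _ _ _ _ hf; omega
  | succ f ih =>
    intro p c j hpj hjn hz hnz hf
    by_cases hpe : p = j
    · subst hpe
      rw [show skipA u n (f+1) p c
          = if u.getD p 0 = 0 then skipA u n f (pyNext n p) (c+1) else some (p, c) from rfl,
        if_neg hnz]
      simp
    · have hplt : p < j := lt_of_le_of_ne hpj hpe
      have hup : u.getD p 0 = 0 := hz p le_rfl hplt
      have hnx : pyNext n p = p + 1 := by unfold pyNext; rw [if_neg (by omega)]
      rw [show skipA u n (f+1) p c
          = if u.getD p 0 = 0 then skipA u n f (pyNext n p) (c+1) else some (p, c) from rfl,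
        if_pos hup, hnx]
      rw [ih (p+1) (c+1) j (by omega) hjn (fun i h1 h2 => hz i (by omega) h2) hnz (by omega)]
      congr 2
      omega

theorem skip_wrap (u : List Int) (n : Nat) (hn : n = u.length) :
    ∀ (p : Nat), 0 < p → p < n → (∀ i, p ≤ i → i < n → u.getD i 0 = 0) →
    ∀ (f c : Nat), n - p ≤ f → skipA u n f p c = skipA u n (f - (n - p)) 0 (c + (n - p)) := by
  have H : ∀ (d p : Nat), n - p = d + 1 → 0 < p → p < n →
      (∀ i, p ≤ i → i < n → u.getD i 0 = 0) →
      ∀ (f c : Nat), n - p ≤ f → skipA u n f p c = skipA u n (f - (n - p)) 0 (c + (n - p)) := by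
    intro d
    induction d with
    | zero =>
      intro p hd hp hpn hz f c hf
      have hpe : p = n - 1 := by omega
      have hup : u.getD p 0 = 0 := hz p le_rfl hpn
      obtain ⟨f', rfl⟩ : ∃ f', f = f' + 1 := ⟨f - 1, by omega⟩
      have hnx : pyNext n p = 0 := by unfold pyNext; rw [if_pos hpe]
      rw [show skipA u n (f'+1) p c = skipA u n f' (pyNext n p) (c+1) by
        rw [show skipA u n (f'+1) p c
            = if u.getD p 0 = 0 then skipA u n f' (pyNext n p) (c+1) else some (p, c) from rfl,
          if_pos hup], hnx]
      congr 1 <;> omega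
    | succ d ih =>
      intro p hd hp hpn hz f c hf
      have hup : u.getD p 0 = 0 := hz p le_rfl hpn
      obtain ⟨f', rfl⟩ : ∃ f', f = f' + 1 := ⟨f - 1, by omega⟩
      have hnx : pyNext n p = p + 1 := by unfold pyNext; rw [if_neg (by omega)]
      rw [show skipA u n (f'+1) p c = skipA u n f' (pyNext n p) (c+1) by
        rw [show skipA u n (f'+1) p c
            = if u.getD p 0 = 0 then skipA u n f' (pyNext n p) (c+1) else some (p, c) from rfl,
          if_pos hup], hnx]
      rw [ih (p+1) (by omega) (by omega) (by omega) (fun i h1 h2 => hz i (by omega) h2) f' (c+1)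
        (by omega)]
      congr 1 <;> omega
  intro p hp hpn hz f c hf
  exact H (n - p - 1) p (by omega) hp hpn hz f c hf

theorem tail_reach (u : List Int) (n : Nat) (hn : n = u.length) :
    ∀ (f p c j : Nat), p ≤ j → j < n → (∀ i, p ≤ i → i < j → u.getD i 0 = 0) →
    u.getD j 0 ≠ 0 → j - p < f → c + (j - p) < n → tailA u n f p c = (j : Int) + 1 := by
  intro f
  induction f with
  | zero => intro p c j _ _ _ _ hf _; omega
  | succ f ih =>
    intro p c j hpj hjn hz hnz hf hcnt
    by_cases hpe : p = j
    · subst hpe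
      rw [show tailA u n (f+1) p c
          = if u.getD p 0 = 0 then (if c + 1 = n then -1 else tailA u n f (pyNext n p) (c+1))
            else (p : Int) + 1 from rfl,
        if_neg hnz]
    · have hplt : p < j := lt_of_le_of_ne hpj hpe
      have hup : u.getD p 0 = 0 := hz p le_rfl hplt
      have hnx : pyNext n p = p + 1 := by unfold pyNext; rw [if_neg (by omega)]
      have hcne : ¬ (c + 1 = n) := by omega
      rw [show tailA u n (f+1) p c
          = if u.getD p 0 = 0 then (if c + 1 = n then -1 else tailA u n f (pyNext n p) (c+1))
            else (p : Int) + 1 from rfl,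
        if_pos hup, if_neg hcne, hnx]
      exact ih (p+1) (c+1) j (by omega) hjn (fun i h1 h2 => hz i (by omega) h2) hnz (by omega)
        (by omega)

theorem tail_wrap (u : List Int) (n : Nat) (hn : n = u.length) :
    ∀ (p : Nat), 0 < p → p < n → (∀ i, p ≤ i → i < n → u.getD i 0 = 0) →
    ∀ (f c : Nat), n - p ≤ f → c + (n - p) < n →
    tailA u n f p c = tailA u n (f - (n - p)) 0 (c + (n - p)) := by
  have H : ∀ (d p : Nat), n - p = d + 1 → 0 < p → p < n →
      (∀ i, p ≤ i → i < n → u.getD i 0 = 0) →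
      ∀ (f c : Nat), n - p ≤ f → c + (n - p) < n →
      tailA u n f p c = tailA u n (f - (n - p)) 0 (c + (n - p)) := by
    intro d
    induction d with
    | zero =>
      intro p hd hp hpn hz f c hf hcnt
      have hpe : p = n - 1 := by omega
      have hup : u.getD p 0 = 0 := hz p le_rfl hpn
      obtain ⟨f', rfl⟩ : ∃ f', f = f' + 1 := ⟨f - 1, by omega⟩
      have hnx : pyNext n p = 0 := by unfold pyNext; rw [if_pos hpe]
      have hcne : ¬ (c + 1 = n) := by omega
      rw [show tailA u n (f'+1) p c
          = if u.getD p 0 = 0 then (if c + 1 = n then -1 else tailA u n f' (pyNext n p) (c+1))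
            else (p : Int) + 1 from rfl,
        if_pos hup, if_neg hcne, hnx]
      congr 1 <;> omega
    | succ d ih =>
      intro p hd hp hpn hz f c hf hcnt
      have hup : u.getD p 0 = 0 := hz p le_rfl hpn
      obtain ⟨f', rfl⟩ : ∃ f', f = f' + 1 := ⟨f - 1, by omega⟩
      have hnx : pyNext n p = p + 1 := by unfold pyNext; rw [if_neg (by omega)]
      have hcne : ¬ (c + 1 = n) := by omega
      rw [show tailA u n (f'+1) p c
          = if u.getD p 0 = 0 then (if c + 1 = n then -1 else tailA u n f' (pyNext n p) (c+1))
            else (p : Int) + 1 from rfl,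
        if_pos hup, if_neg hcne, hnx]
      rw [ih (p+1) (by omega) (by omega) (by omega) (fun i h1 h2 => hz i (by omega) h2) f' (c+1)
        (by omega) (by omega)]
      congr 1 <;> omega
  intro p hp hpn hz f c hf hcnt
  exact H (n - p - 1) p (by omega) hp hpn hz f c hf hcnt

theorem tail_allzero (u : List Int) (n : Nat) (hn : n = u.length) (hpos : 0 < n)
    (hz : ∀ i, i < n → u.getD i 0 = 0) :
    ∀ (d f p c : Nat), n - c = d → p < n → c < n → n - c ≤ f → tailA u n f p c = -1 := by
  intro d
  induction d with
  | zero => intro f p c hd _ hc _; omega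
  | succ d ih =>
    intro f p c hd hp hc hf
    have hup : u.getD p 0 = 0 := hz p hp
    obtain ⟨f', rfl⟩ : ∃ f', f = f' + 1 := ⟨f - 1, by omega⟩
    by_cases hce : c + 1 = n
    · rw [show tailA u n (f'+1) p c
          = if u.getD p 0 = 0 then (if c + 1 = n then -1 else tailA u n f' (pyNext n p) (c+1))
            else (p : Int) + 1 from rfl,
        if_pos hup, if_pos hce]
    · rw [show tailA u n (f'+1) p c
          = if u.getD p 0 = 0 then (if c + 1 = n then -1 else tailA u n f' (pyNext n p) (c+1))
            else (p : Int) + 1 from rfl,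
        if_pos hup, if_neg hce]
      exact ih f' (pyNext n p) (c+1) (by omega) (pyNext_lt hpos hp) (by omega) (by omega)

theorem getD_map_zero (t : List Int) (f : Int → Int) (hf : f 0 = 0) (i : Nat) :
    (t.map f).getD i 0 = f (t.getD i 0) := by
  by_cases hi : i < t.length
  · rw [List.getD_eq_getElem _ _ (by simpa using hi), List.getD_eq_getElem _ _ hi]
    simp
  · rw [List.getD_eq_default _ _ (by simpa using le_of_not_gt hi),
      List.getD_eq_default _ _ (le_of_not_gt hi), hf]

theorem mem_take_succ_acts (t : List Int) {i j : Nat} (hj : j < (acts t).length) :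
    i ∈ (acts t).take (j+1) ↔ i ∈ (acts t).take j ∨ i = (acts t).getD j 0 := by
  rw [mem_take_acts, mem_take_acts]
  constructor
  · rintro ⟨r, h1, h2, h3⟩
    by_cases hr : r < j
    · exact Or.inl ⟨r, hr, h2, h3⟩
    · have : r = j := by omega
      subst this
      exact Or.inr h3.symm
  · rintro (⟨r, h1, h2, h3⟩ | h)
    · exact ⟨r, by omega, h2, h3⟩
    · exact ⟨j, by omega, hj, h.symm⟩

-- the facts shared by step_j and tail_j: pointer position, zeros up to acts[j], value there
theorem hub (t : List Int) {j : Nat} (hj : j < (acts t).length) :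
    ptrA t j ≤ (acts t).getD j 0 ∧
    (∀ i, ptrA t j ≤ i → i < (acts t).getD j 0 → (decP t j).getD i 0 = 0) ∧
    (decP t j).getD ((acts t).getD j 0) 0 = t.getD ((acts t).getD j 0) 0 := by
  have haj : (acts t).getD j 0 < t.length := acts_elem_lt t hj
  have hple : ptrA t j ≤ (acts t).getD j 0 := by
    unfold ptrA
    split
    · omega
    · rename_i hj0
      have hj1 : j - 1 < j := by omega
      have hmono := acts_mono t hj1 hj
      unfold pyNext
      split <;> omega
  refine ⟨hple, ?_, ?_⟩
  · intro i h1 h2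
    have hin : i < t.length := by omega
    have hnm : i ∉ acts t := by
      intro hmem
      obtain ⟨r, hr, hrv⟩ := acts_below t hj hmem h2
      rcases Nat.eq_zero_or_pos j with hj0 | hj0
      · omega
      · have hr1 : r ≤ j - 1 := by omega
        have : (acts t).getD r 0 ≤ (acts t).getD (j-1) 0 := by
          rcases eq_or_lt_of_le hr1 with h | h
          · rw [h]
          · exact le_of_lt (acts_mono t h (by omega))
        have hpj : ptrA t j = pyNext t.length ((acts t).getD (j-1) 0) := by
          unfold ptrA; rw [if_neg (by omega)]
        have hjm1 : (acts t).getD (j-1) 0 < (acts t).getD j 0 := acts_mono t (by omega) hj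
        rw [hpj] at h1
        unfold pyNext at h1
        split at h1 <;> omega
    rw [decP_getD t j hin]
    rw [if_neg (fun hmem => hnm (by
      obtain ⟨r, _, h2', h3⟩ := (mem_take_acts t).mp hmem
      rw [← h3, List.getD_eq_getElem _ _ h2']
      exact List.getElem_mem h2'))]
    exact acts_notmem_zero t hin hnm
  · rw [decP_getD t j haj, if_neg (acts_elem_notmem_take t le_rfl hj)]

-- the j-th second of a round: from pointer ptrA t j the skip loop finds acts[j]
theorem step_j (t : List Int) {j : Nat} (hj : j < (acts t).length) :
    stepA t.length (.run (decP t j) (ptrA t j)) = .run (decP t (j+1)) (ptrA t (j+1)) := by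
  obtain ⟨hple, hz, hval⟩ := hub t hj
  have haj : (acts t).getD j 0 < t.length := acts_elem_lt t hj
  have hne : (decP t j).getD ((acts t).getD j 0) 0 ≠ 0 := by
    rw [hval]; exact acts_elem_ne t hj
  have hskip := skip_reach (decP t j) t.length (decP_length t j).symm (t.length + 1)
    (ptrA t j) 0 ((acts t).getD j 0) hple haj hz hne (by omega)
  rw [show stepA t.length (.run (decP t j) (ptrA t j)) =
      (match skipA (decP t j) t.length (t.length+1) (ptrA t j) 0 with
        | none => ASt.stuck
        | some (j', count) =>
          if count = t.length then ASt.neg1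
          else ASt.run ((decP t j).set j' ((decP t j).getD j' 0 - 1)) (pyNext t.length j'))
    from rfl, hskip]
  simp only
  rw [if_neg (by omega)]
  have hset : (decP t j).set ((acts t).getD j 0) ((decP t j).getD ((acts t).getD j 0) 0 - 1)
      = decP t (j+1) := by
    apply List.ext_getElem (by rw [List.length_set, decP_length, decP_length])
    intro i hi1 hi2
    have hilen : i < t.length := by rw [decP_length] at hi2; exact hi2
    have hgd1 : ((decP t j).set ((acts t).getD j 0) ((decP t j).getD ((acts t).getD j 0) 0 - 1))[i]
        = if (acts t).getD j 0 = i then (decP t j).getD ((acts t).getD j 0) 0 - 1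
          else (decP t j).getD i 0 := by
      rw [List.getElem_set]
      split
      · rfl
      · exact (List.getD_eq_getElem _ 0 (by rw [decP_length]; exact hilen)).symm
    rw [hgd1, ← List.getD_eq_getElem (decP t (j+1)) _ hi2, decP_getD t (j+1) hilen]
    by_cases hia : (acts t).getD j 0 = i
    · rw [if_pos hia, if_pos (by rw [mem_take_succ_acts t hj]; exact Or.inr hia.symm)]
      rw [hval, hia]
    · rw [if_neg hia, decP_getD t j hilen]
      by_cases hmem : i ∈ (acts t).take j
      · rw [if_pos hmem, if_pos ((mem_take_succ_acts t hj).mpr (Or.inl hmem))]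
      · rw [if_neg hmem, if_neg (fun hc => by
          rcases (mem_take_succ_acts t hj).mp hc with h | h
          · exact hmem h
          · exact hia h.symm)]
  rw [hset]
  have hptr : pyNext t.length ((acts t).getD j 0) = ptrA t (j+1) := by
    unfold ptrA; rw [if_neg (by omega)]; simp
  rw [hptr]

theorem partial_round (t : List Int) {j : Nat} (hj : j ≤ (acts t).length) :
    (stepA t.length)^[j] (.run t 0) = .run (decP t j) (ptrA t j) := by
  induction j with
  | zero => simp [decP_zero, ptrA]
  | succ j ih =>
    rw [Function.iterate_succ_apply', ih (by omega), step_j t (by omega)]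

theorem tail_j (t : List Int) {j : Nat} (hj : j < (acts t).length) :
    tailA (decP t j) t.length (t.length + 1) (ptrA t j) 0 = ((acts t).getD j 0 : Int) + 1 := by
  obtain ⟨hple, hz, hval⟩ := hub t hj
  have haj : (acts t).getD j 0 < t.length := acts_elem_lt t hj
  have hne : (decP t j).getD ((acts t).getD j 0) 0 ≠ 0 := by
    rw [hval]; exact acts_elem_ne t hj
  exact tail_reach (decP t j) t.length (decP_length t j).symm (t.length + 1)
    (ptrA t j) 0 ((acts t).getD j 0) hple haj hz hne (by omega) (by omega)

-- a full round decrements every non-zero entry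
theorem dec1_length (t : List Int) : (dec1 t).length = t.length := by simp [dec1]

theorem dec1_getD (t : List Int) {i : Nat} (hi : i < t.length) :
    (dec1 t).getD i 0 = if t.getD i 0 ≠ 0 then t.getD i 0 - 1 else t.getD i 0 := by
  unfold dec1
  rw [getD_map_zero t _ (by simp) i]

theorem decP_full (t : List Int) : decP t (acts t).length = dec1 t := by
  apply List.ext_getElem (by rw [decP_length, dec1_length])
  intro i hi1 hi2
  have hilen : i < t.length := by rw [decP_length] at hi1; exact hi1
  rw [← List.getD_eq_getElem _ _ hi1, ← List.getD_eq_getElem _ _ hi2]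
  rw [decP_getD t _ hilen, List.take_length, dec1_getD t hilen]
  by_cases h : t.getD i 0 = 0
  · rw [if_neg (fun hm => ((mem_acts t i).mp hm).2 h), if_neg (by simpa using h)]
  · rw [if_pos ((mem_acts t i).mpr ⟨hilen, h⟩), if_pos (by simpa using h)]

-- after the last active index everything is zero (also in dec1 t)
theorem ptr_zeros (t : List Int) (hm : acts t ≠ []) :
    ptrA t (acts t).length = 0 ∨
      (0 < ptrA t (acts t).length ∧ ptrA t (acts t).length < t.length ∧
       ∀ i, ptrA t (acts t).length ≤ i → i < t.length → (dec1 t).getD i 0 = 0) := by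
  have hm : 0 < (acts t).length := List.length_pos_iff.mpr hm
  have ha : (acts t).getD ((acts t).length - 1) 0 < t.length := acts_elem_lt t (by omega)
  have hptr : ptrA t (acts t).length
      = pyNext t.length ((acts t).getD ((acts t).length - 1) 0) := by
    unfold ptrA; rw [if_neg (by omega)]
  by_cases hlast : (acts t).getD ((acts t).length - 1) 0 = t.length - 1
  · left
    rw [hptr]; unfold pyNext; rw [if_pos hlast]
  · right
    have hp : ptrA t (acts t).length = (acts t).getD ((acts t).length - 1) 0 + 1 := by
      rw [hptr]; unfold pyNext; rw [if_neg hlast]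
    refine ⟨by omega, by omega, ?_⟩
    intro i h1 h2
    have hnm : i ∉ acts t := by
      intro hmem
      obtain ⟨r, hr, hrv⟩ := List.mem_iff_getElem.mp hmem
      have : (acts t).getD r 0 ≤ (acts t).getD ((acts t).length - 1) 0 := by
        rcases eq_or_lt_of_le (show r ≤ (acts t).length - 1 by omega) with h | h
        · rw [h]
        · exact le_of_lt (acts_mono t h (by omega))
      rw [List.getD_eq_getElem _ _ hr, hrv] at this
      omega
    rw [dec1_getD t h2, if_neg (by simpa using acts_notmem_zero t h2 hnm)]
    exact acts_notmem_zero t h2 hnm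

theorem ptrA_lt (t : List Int) (hm : acts t ≠ []) (j : Nat) : ptrA t j < t.length := by
  have hm : 0 < (acts t).length := List.length_pos_iff.mpr hm
  have hn : 0 < t.length := acts_elem_lt t (j := 0) hm |>.trans_le' (by omega)
  unfold ptrA
  split
  · exact hn
  · by_cases hj : j - 1 < (acts t).length
    · exact pyNext_lt hn (acts_elem_lt t hj)
    · rw [List.getD_eq_default _ _ (by omega)]
      exact pyNext_lt hn hn

theorem first_active (u : List Int) (hu : acts u ≠ []) :
    (acts u).getD 0 0 < u.length ∧ u.getD ((acts u).getD 0 0) 0 ≠ 0 ∧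
      ∀ i, i < (acts u).getD 0 0 → u.getD i 0 = 0 := by
  have hm : 0 < (acts u).length := List.length_pos_iff.mpr hu
  refine ⟨acts_elem_lt u hm, acts_elem_ne u hm, ?_⟩
  intro i hi
  have hin : i < u.length := lt_trans hi (acts_elem_lt u hm)
  refine acts_notmem_zero u hin (fun hmem => ?_)
  obtain ⟨r, hr, _⟩ := acts_below u hm hmem hi
  omega

theorem step_reset (u : List Int) (n : Nat) (hn : n = u.length) (hu : acts u ≠ []) (p : Nat)
    (hp : p = 0 ∨ (0 < p ∧ p < n ∧ ∀ i, p ≤ i → i < n → u.getD i 0 = 0)) :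
    stepA n (.run u p) = stepA n (.run u 0) := by
  rcases hp with rfl | ⟨hp0, hpn, hz⟩
  · rfl
  obtain ⟨hj0n, hj0ne, hj0z⟩ := first_active u hu
  rw [← hn] at hj0n
  have hj0p : (acts u).getD 0 0 < p := by
    by_contra h
    exact hj0ne (hz _ (le_of_not_gt (by omega)) (by omega))
  have hs1 : skipA u n (n+1) p 0 = some ((acts u).getD 0 0, 0 + (n - p) + ((acts u).getD 0 0 - 0)) := by
    rw [skip_wrap u n hn p hp0 hpn hz (n+1) 0 (by omega)]
    exact skip_reach u n hn _ 0 (0 + (n - p)) _ (by omega) hj0n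
      (fun i _ h2 => hj0z i h2) hj0ne (by omega)
  have hs2 : skipA u n (n+1) 0 0 = some ((acts u).getD 0 0, 0 + ((acts u).getD 0 0 - 0)) :=
    skip_reach u n hn (n+1) 0 0 _ (by omega) hj0n (fun i _ h2 => hj0z i h2) hj0ne (by omega)
  show (match skipA u n (n+1) p 0 with
        | none => ASt.stuck
        | some (j', count) =>
          if count = n then ASt.neg1
          else ASt.run (u.set j' (u.getD j' 0 - 1)) (pyNext n j'))
      = (match skipA u n (n+1) 0 0 with
        | none => ASt.stuck
        | some (j', count) =>
          if count = n then ASt.neg1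
          else ASt.run (u.set j' (u.getD j' 0 - 1)) (pyNext n j'))
  rw [hs1, hs2]
  simp only
  rw [if_neg (by omega), if_neg (by omega)]

theorem tail_reset (u : List Int) (n : Nat) (hn : n = u.length) (hu : acts u ≠ []) (p : Nat)
    (hp : p = 0 ∨ (0 < p ∧ p < n ∧ ∀ i, p ≤ i → i < n → u.getD i 0 = 0)) :
    tailA u n (n+1) p 0 = tailA u n (n+1) 0 0 := by
  rcases hp with rfl | ⟨hp0, hpn, hz⟩
  · rfl
  obtain ⟨hj0n, hj0ne, hj0z⟩ := first_active u hu
  rw [← hn] at hj0n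
  have hj0p : (acts u).getD 0 0 < p := by
    by_contra h
    exact hj0ne (hz _ (le_of_not_gt (by omega)) (by omega))
  rw [tail_wrap u n hn p hp0 hpn hz (n+1) 0 (by omega) (by omega)]
  rw [tail_reach u n hn _ 0 (0 + (n - p)) _ (by omega) hj0n (fun i _ h2 => hj0z i h2) hj0ne
    (by omega) (by omega)]
  rw [tail_reach u n hn (n+1) 0 0 _ (by omega) hj0n (fun i _ h2 => hj0z i h2) hj0ne
    (by omega) (by omega)]

theorem acts_nil_zero (u : List Int) (h : acts u = []) : ∀ i, i < u.length → u.getD i 0 = 0 := by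
  intro i hi
  by_contra hne
  have : i ∈ acts u := (mem_acts u i).mpr ⟨hi, hne⟩
  rw [h] at this
  exact absurd this (List.not_mem_nil)

-- counting lemmas
theorem acts_cons (x : Int) (xs : List Int) :
    acts (x :: xs) = if x ≠ 0 then 0 :: (acts xs).map (· + 1) else (acts xs).map (· + 1) := by
  unfold acts
  rw [show (x :: xs).length = xs.length + 1 from rfl, List.range_succ_eq_map]
  rw [List.filter_cons, List.filter_map]
  have hc : List.filter ((fun i => decide ((x :: xs).getD i 0 ≠ 0)) ∘ Nat.succ)
      (List.range xs.length) = List.filter (fun i => decide (xs.getD i 0 ≠ 0))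
      (List.range xs.length) := by
    apply List.filter_congr
    intro i _
    simp [Function.comp]
  rw [hc]
  by_cases hx : x = 0
  · simp [hx, Nat.succ_eq_add_one]
  · simp [hx, Nat.succ_eq_add_one]

theorem acts_len_countP (t : List Int) :
    (acts t).length = t.countP (fun x => decide (x ≠ 0)) := by
  induction t with
  | nil => rfl
  | cons x xs ih =>
    rw [acts_cons, List.countP_cons]
    by_cases hx : x ≠ 0
    · rw [if_pos hx]
      simp [ih, hx]
    · rw [if_neg hx]
      simp only [ne_eq, not_not] at hx
      simp [ih, hx]

theorem sumPos_zero_one (t : List Int) (h : ∀ x ∈ t, x = 0 ∨ x = 1) :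
    sumPos t = ((acts t).length : Int) := by
  rw [acts_len_countP]
  induction t with
  | nil => rfl
  | cons x xs ih =>
    have hx := h x (List.mem_cons_self)
    have ih' := ih (fun y hy => h y (List.mem_cons_of_mem x hy))
    rw [List.countP_cons]
    unfold sumPos at *
    rw [List.filter_cons]
    rcases hx with rfl | rfl
    · norm_num
      norm_num at ih'
      linarith [ih']
    · norm_num
      norm_num at ih'
      linarith [ih']

theorem sumPos_dec1 (t : List Int) (h : ∀ x ∈ t, ¬ x < 0) :
    sumPos (dec1 t) = sumPos t - ((acts t).length : Int) := by
  rw [acts_len_countP]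
  induction t with
  | nil => rfl
  | cons x xs ih =>
    have ih' := ih (fun y hy => h y (List.mem_cons_of_mem x hy))
    have hx := h x (List.mem_cons_self)
    have hd : dec1 (x :: xs) = (if x ≠ 0 then x - 1 else x) :: dec1 xs := by simp [dec1]
    by_cases hx0 : x = 0
    · subst hx0
      unfold sumPos at *
      rw [hd]
      simp only [ne_eq, not_true_eq_false, if_false, List.filter_cons, List.countP_cons]
      norm_num
      norm_num at ih'
      linarith [ih']
    · have hx1 : 0 < x := by omega
      have e1 : List.filter (fun y => decide (0 < y)) (x :: xs)
          = x :: List.filter (fun y => decide (0 < y)) xs := by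
        rw [List.filter_cons, if_pos (by simpa using hx1)]
      have e2 : (if x ≠ 0 then x - 1 else x) = x - 1 := by simp [hx0]
      have e3 : (x :: xs).countP (fun y => decide (y ≠ 0))
          = xs.countP (fun y => decide (y ≠ 0)) + 1 := by
        rw [List.countP_cons]; simp [hx0]
      unfold sumPos at *
      rw [hd, e2, e1, e3, List.filter_cons]
      by_cases hx2 : 0 < x - 1
      · rw [if_pos (by simpa using hx2), List.sum_cons, List.sum_cons]
        norm_num at ih' ⊢
        push_cast at ih' ⊢
        linarith [ih']
      · have hx1' : x = 1 := by omega
        rw [if_neg (by simpa using hx2), List.sum_cons]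
        subst hx1'
        norm_num at ih' ⊢
        push_cast at ih' ⊢
        linarith [ih']

theorem hasNeg_dec1 (t : List Int) (h : ∃ x ∈ t, x < 0) : ∃ x ∈ dec1 t, x < 0 := by
  obtain ⟨x, hx, hneg⟩ := h
  exact ⟨x - 1, by simpa [dec1] using ⟨x, hx, by simp [show x ≠ 0 by omega]⟩, by omega⟩

theorem solution_eq (t : List Int) (k : Int) :
    solution t k = match (stepA t.length)^[k.toNat] (.run t 0) with
      | .neg1 => -1
      | .stuck => 0
      | .run u idx => tailA u t.length (t.length+1) idx 0 := by
  simp [solution, foldl_range_eq_iterate]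

-- the main equivalence on the A side: simulation = round recursion
theorem main_A : ∀ (N : Nat) (t : List Int) (k : Int), k.toNat = N → 0 ≤ k → t ≠ [] →
    ((∃ x ∈ t, x < 0) ∨ k ≤ sumPos t) → solution t k = rounds t k := by
  intro N
  induction N using Nat.strong_induction_on with
  | _ N IH =>
  intro t k hkN hk0 hne hside
  have hn0 : 0 < t.length := List.length_pos_iff.mpr hne
  by_cases hm0 : acts t = []
  · -- all entries are zero: Pre_ forces k = 0 and the tail loop returns -1
    have hz := acts_nil_zero t hm0
    have hall : ∀ x ∈ t, x = 0 := by
      intro x hx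
      obtain ⟨i, hi, hv⟩ := List.mem_iff_getElem.mp hx
      rw [← hv, ← List.getD_eq_getElem t 0 hi]
      exact hz i hi
    have hsum : sumPos t = 0 := by
      unfold sumPos
      rw [List.filter_eq_nil_iff.mpr (fun x hx => by have := hall x hx; simp [this])]
      rfl
    have hk : k = 0 := by
      rcases hside with ⟨x, hx, hlt⟩ | hle
      · have := hall x hx; omega
      · omega
    subst hk
    rw [solution_eq]
    simp only [Int.toNat_zero, Function.iterate_zero, id]
    show tailA t t.length (t.length+1) 0 0 = rounds t 0
    rw [tail_allzero t t.length rfl hn0 hz (t.length - 0) (t.length+1) 0 0 rfl hn0 hn0 (by omega)]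
    rw [rounds, dif_pos hm0]
  · have hmpos : 0 < (acts t).length := List.length_pos_iff.mpr hm0
    by_cases hkm : k < ((acts t).length : Int)
    · -- partial round: the answer is the k-th surviving index
      have hkm' : k.toNat < (acts t).length := by omega
      rw [solution_eq, partial_round t (le_of_lt hkm')]
      show tailA (decP t k.toNat) t.length (t.length+1) (ptrA t k.toNat) 0 = rounds t k
      rw [tail_j t hkm']
      rw [rounds, dif_neg hm0, if_pos hkm]
    · -- at least one full round
      push_neg at hkm
      have hmk : (acts t).length ≤ k.toNat := by omega
      have hlen : (dec1 t).length = t.length := dec1_length t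
      have hfull : (stepA t.length)^[(acts t).length] (.run t 0)
          = .run (dec1 t) (ptrA t (acts t).length) := by
        rw [partial_round t le_rfl, decP_full]
      have hsplit : (stepA t.length)^[k.toNat] (.run t 0)
          = (stepA t.length)^[k.toNat - (acts t).length]
              (.run (dec1 t) (ptrA t (acts t).length)) := by
        conv_lhs => rw [show k.toNat = (k.toNat - (acts t).length) + (acts t).length by omega]
        rw [Function.iterate_add_apply, hfull]
      by_cases hu0 : acts (dec1 t) = []
      · -- the food is exhausted exactly now: k = number of active foods, result -1
        have hnoneg : ¬ ∃ x ∈ t, x < 0 := by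
          rintro ⟨x, hx, hlt⟩
          obtain ⟨y, hy, hylt⟩ := hasNeg_dec1 t ⟨x, hx, hlt⟩
          obtain ⟨i, hi, hv⟩ := List.mem_iff_getElem.mp hy
          have hzz := acts_nil_zero (dec1 t) hu0 i hi
          rw [List.getD_eq_getElem _ 0 hi, hv] at hzz
          omega
        have hle : k ≤ sumPos t := hside.resolve_left hnoneg
        have h01 : ∀ x ∈ t, x = 0 ∨ x = 1 := by
          intro x hx
          obtain ⟨i, hi, hv⟩ := List.mem_iff_getElem.mp hx
          have hdz := acts_nil_zero (dec1 t) hu0 i (by rw [hlen]; exact hi)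
          rw [dec1_getD t hi] at hdz
          rw [← List.getD_eq_getElem t 0 hi] at hv
          rw [hv] at hdz
          by_cases hx0 : x = 0
          · exact Or.inl hx0
          · right
            rw [if_pos hx0] at hdz
            omega
        have hsum : sumPos t = ((acts t).length : Int) := sumPos_zero_one t h01
        have hz0 : k.toNat - (acts t).length = 0 := by omega
        rw [solution_eq, hsplit, hz0]
        simp only [Function.iterate_zero, id]
        show tailA (dec1 t) t.length (t.length+1) (ptrA t (acts t).length) 0 = rounds t k
        rw [tail_allzero (dec1 t) t.length hlen.symm hn0
          (fun i hi => acts_nil_zero (dec1 t) hu0 i (by rw [hlen]; exact hi))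
          (t.length - 0) (t.length+1) (ptrA t (acts t).length) 0 rfl (ptrA_lt t hm0 _) hn0
          (by omega)]
        rw [rounds, dif_neg hm0, if_neg (not_lt.mpr hkm)]
        rw [rounds, dif_pos hu0]
      · -- survivors remain: one full round, pointer resets, recurse via IH
        have hdisj := ptr_zeros t hm0
        have htn : (k - ((acts t).length : Int)).toNat = k.toNat - (acts t).length := by
          clear IH hside hdisj hsplit hfull
          omega
        have hune : dec1 t ≠ [] := by
          intro h
          rw [h] at hlen
          simp at hlen
          omega
        have hEq : solution t k = solution (dec1 t) (k - ((acts t).length : Int)) := by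
          rw [solution_eq, hsplit]
          rw [solution_eq (dec1 t), hlen, htn]
          rcases Nat.eq_zero_or_pos (k.toNat - (acts t).length) with hd0 | hdpos
          · rw [hd0]
            simp only [Function.iterate_zero, id]
            show tailA (dec1 t) t.length (t.length+1) (ptrA t (acts t).length) 0
              = tailA (dec1 t) t.length (t.length+1) 0 0
            exact tail_reset (dec1 t) t.length hlen.symm hu0 _ hdisj
          · obtain ⟨d, hd⟩ : ∃ d, k.toNat - (acts t).length = d + 1 :=
              ⟨k.toNat - (acts t).length - 1, by omega⟩
            rw [hd, Function.iterate_succ_apply,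
              step_reset (dec1 t) t.length hlen.symm hu0 _ hdisj,
              ← Function.iterate_succ_apply]
        rw [hEq]
        have hIH := IH ((k - ((acts t).length : Int)).toNat) (by omega) (dec1 t)
          (k - ((acts t).length : Int)) rfl (by omega) hune ?side
        · rw [hIH]
          conv_rhs => rw [rounds]
          rw [dif_neg hm0, if_neg (not_lt.mpr hkm)]
        · by_cases hneg : ∃ x ∈ t, x < 0
          · exact Or.inl (hasNeg_dec1 t hneg)
          · have hnn : ∀ x ∈ t, ¬ x < 0 := fun x hx hlt => hneg ⟨x, hx, hlt⟩
            have hsd := sumPos_dec1 t hnn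
            have hle : k ≤ sumPos t := hside.resolve_left hneg
            exact Or.inr (by omega)

-- the B side: bulk round recursion = round recursion
theorem enum_filterMap (t : List Int) :
    (PySem.List.enumerate t 0).filterMap (fun p => if p.2 ≠ 0 then some p.1 else none)
      = (acts t).map (fun (i : Nat) => (i : Int)) := by
  have H : ∀ (xs : List Int) (s : Nat),
      (PySem.List.enumerate xs (s : Int)).filterMap (fun p => if p.2 ≠ 0 then some p.1 else none)
        = (acts xs).map (fun i => ((s + i : Nat) : Int)) := by
    intro xs
    induction xs with
    | nil => intro s; simp [PySem.List.enumerate, acts]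
    | cons x t ih =>
      intro s
      rw [PySem.List.enumerate_cons, List.filterMap_cons]
      have hsucc : ((s : Int) + 1) = ((s + 1 : Nat) : Int) := by push_cast; ring
      rw [hsucc, ih (s+1), acts_cons]
      have hmm : List.map (fun i => ((s + 1 + i : Nat) : Int)) (acts t)
          = List.map (fun i => ((s + i : Nat) : Int)) (List.map (fun x => x + 1) (acts t)) := by
        rw [List.map_map]
        apply List.map_congr_left
        intro a _
        simp [Function.comp]
        omega
      by_cases hx : x = 0
      · simp only [hx, ne_eq, not_true_eq_false, if_false]
        exact hmm
      · simp only [ne_eq, hx, not_false_eq_true, if_true]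
        have hhead : ((s : Int)) = ((s + 0 : Nat) : Int) := by simp
        rw [List.map_cons, ← hmm, ← hhead]
  have h0 := H t 0
  simpa using h0

theorem acts_congr (t u : List Int) (hl : t.length = u.length)
    (h : ∀ i, i < t.length → (t.getD i 0 = 0 ↔ u.getD i 0 = 0)) : acts t = acts u := by
  unfold acts
  rw [← hl]
  apply List.filter_congr
  intro i hi
  rw [List.mem_range] at hi
  simp only [ne_eq, decide_eq_decide]
  exact not_congr (h i hi)

theorem getD_map_acts (t : List Int) (k : Int) (hk : 0 ≤ k)
    (hlt : k < ((acts t).length : Int)) :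
    (PySem.List.pyGet? ((acts t).map (fun (i : Nat) => (i : Int))) k).getD 0
      = ((acts t).getD k.toNat 0 : Int) := by
  rw [PySem.List.pyGet?_of_nonneg _ hk]
  have hlt' : k.toNat < (acts t).length := by omega
  rw [List.getElem?_eq_getElem (by simpa using hlt')]
  simp only [List.getElem_map, Option.getD_some]
  rw [List.getD_eq_getElem _ _ hlt']

theorem rounds_bulk : ∀ (j : Nat) (t : List Int) (k : Int), acts t ≠ [] →
    (∀ x ∈ t, 0 < x → (j : Int) ≤ x) → (j : Int) * ((acts t).length : Int) ≤ k →
    rounds t k = rounds (decQN t j) (k - (j : Int) * ((acts t).length : Int)) := by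
  intro j
  induction j with
  | zero =>
    intro t k hm0 hmin hk
    have h0 : decQN t 0 = t := by
      unfold decQN
      have hid : ∀ x ∈ t, (if x ≠ 0 then x - ((0 : Nat) : Int) else x) = x := by
        intro x _; split <;> simp
      rw [List.map_congr_left hid]
      simp
    rw [h0]
    norm_num
  | succ j ih =>
    intro t k hm0 hmin hk
    have hmI : (0 : Int) < ((acts t).length : Int) := by
      exact_mod_cast List.length_pos_iff.mpr hm0
    have hminj : ∀ x ∈ t, 0 < x → (j : Int) ≤ x := by
      intro x hx h
      have := hmin x hx h
      push_cast at this ⊢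
      omega
    have hkj : (j : Int) * ((acts t).length : Int) ≤ k := by
      have hcast : (((j+1 : Nat)) : Int) = (j : Int) + 1 := by push_cast; ring
      rw [hcast] at hk
      nlinarith
    have hIH := ih t k hm0 hminj hkj
    have hacts : acts (decQN t j) = acts t := by
      apply acts_congr
      · simp [decQN]
      · intro i hi
        have hi' : i < t.length := by simpa [decQN] using hi
        unfold decQN
        rw [getD_map_zero t _ (by simp) i]
        have hmem : t.getD i 0 ∈ t := by
          rw [List.getD_eq_getElem t 0 hi']
          exact List.getElem_mem hi'
        by_cases hz : t.getD i 0 = 0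
        · rw [hz]
          simp
        · rw [if_pos (by simpa using hz)]
          constructor
          · intro h
            exfalso
            by_cases hxp : 0 < t.getD i 0
            · have := hmin _ hmem hxp
              push_cast at this
              omega
            · omega
          · intro h
            exact absurd h hz
    have hmd0 : acts (decQN t j) ≠ [] := by rw [hacts]; exact hm0
    have hnotlt : ¬ (k - (j : Int) * ((acts t).length : Int)
        < ((acts (decQN t j)).length : Int)) := by
      rw [hacts]
      have hcast : (((j+1 : Nat)) : Int) = (j : Int) + 1 := by push_cast; ring
      rw [hcast] at hk
      nlinarith
    have hstep : rounds (decQN t j) (k - (j : Int) * ((acts t).length : Int))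
        = rounds (dec1 (decQN t j))
            (k - (j : Int) * ((acts t).length : Int) - ((acts (decQN t j)).length : Int)) := by
      rw [rounds, dif_neg hmd0, if_neg hnotlt]
    have hdec : dec1 (decQN t j) = decQN t (j+1) := by
      unfold dec1 decQN
      rw [List.map_map]
      apply List.map_congr_left
      intro x hx
      simp only [Function.comp]
      by_cases hx0 : x = 0
      · simp [hx0]
      · have h1 : (if x ≠ 0 then x - (j : Int) else x) = x - (j : Int) := by simp [hx0]
        have hxj : x - (j : Int) ≠ 0 := by
          by_cases hxp : 0 < x
          · have := hmin x hx hxp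
            push_cast at this
            omega
          · omega
        rw [h1, if_pos hxj, if_pos hx0]
        push_cast
        ring
    rw [hIH, hstep, hdec, hacts]
    congr 1
    push_cast
    ring

theorem main_B : ∀ (N : Nat) (t : List Int) (k : Int), k.toNat = N → 0 ≤ k →
    altLoop t k = rounds t k := by
  intro N
  induction N using Nat.strong_induction_on with
  | _ N IH =>
  intro t k hkN hk0
  rw [altLoop, enum_filterMap]
  by_cases hm0 : acts t = []
  · rw [hm0]
    simp only [List.map_nil, dite_true]
    rw [rounds, dif_pos hm0]
  · have hmapne : List.map (fun (i : Nat) => (i : Int)) (acts t) ≠ [] := by simpa using hm0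
    rw [dif_neg hmapne]
    simp only [List.length_map]
    by_cases hkm : k < ((acts t).length : Int)
    · rw [dif_pos hkm, getD_map_acts t k hk0 hkm]
      rw [rounds, dif_neg hm0, if_pos hkm]
    · rw [dif_neg hkm]
      have hmI : (0 : Int) < ((acts t).length : Int) := by
        exact_mod_cast List.length_pos_iff.mpr hm0
      have hkm' : ((acts t).length : Int) ≤ k := not_lt.mp hkm
      have hposall : ∀ x ∈ List.filter (fun x => decide (0 < x)) t, 0 < x := fun x hx => by
        simpa using (List.mem_filter.mp hx).2
      obtain ⟨hq1, hqfd⟩ := alt_q_facts (List.filter (fun x => decide (0 < x)) t) k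
        ((acts t).length : Int) hmI hkm' hposall
      set q := (PySem.List.min? (List.filter (fun x => decide (0 < x)) t
          ++ [PySem.Int.floordiv k ((acts t).length : Int)]) (fun x => x)).getD 0 with hqdef
      have hqk : q * ((acts t).length : Int) ≤ k :=
        le_trans (mul_le_mul_of_nonneg_right hqfd (by omega)) (alt_fd_mul_le k _ hmI)
      have hq1m : 1 ≤ q * ((acts t).length : Int) := by nlinarith
      have hcast : ((q.toNat : Nat) : Int) = q := by omega
      have hmapq : List.map (fun x => if x ≠ 0 then x - q else x) t = decQN t q.toNat := by
        unfold decQN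
        rw [hcast]
      have hIH := IH (k - q * ((acts t).length : Int)).toNat
        (by
          have hlt : (k - q * ((acts t).length : Int)).toNat < k.toNat := by
            generalize hP : q * ((acts t).length : Int) = P at hqk hq1m
            omega
          omega)
        (decQN t q.toNat) (k - q * ((acts t).length : Int)) rfl
        (by
          generalize hP : q * ((acts t).length : Int) = P at hqk hq1m
          omega)
      rw [hmapq, hIH]
      have hmin : ∀ x ∈ t, 0 < x → ((q.toNat : Nat) : Int) ≤ x := by
        intro x hx hxp
        rw [hcast]
        have hqx : q ≤ x := by
          obtain ⟨v, hv⟩ : ∃ v, PySem.List.min? (List.filter (fun y => decide (0 < y)) t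
              ++ [PySem.Int.floordiv k ((acts t).length : Int)]) (fun y => y) = some v := by
            cases h : PySem.List.min? (List.filter (fun y => decide (0 < y)) t
                ++ [PySem.Int.floordiv k ((acts t).length : Int)]) (fun y => y) with
            | none => simp [PySem.List.min?_eq_none_iff] at h
            | some v => exact ⟨v, rfl⟩
          have hvx : v ≤ x := PySem.List.min?_isMin hv x
            (List.mem_append.mpr (Or.inl (List.mem_filter.mpr ⟨hx, by simpa using hxp⟩)))
          rw [hqdef, hv]
          simpa using hvx
        omega
      have hbulk := rounds_bulk q.toNat t k hm0 hmin (by rw [hcast]; exact hqk)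
      rw [hbulk, hcast]

-- ===== VERDICT (by name: the statement is the Claim_ definition above) =====
theorem solution_spec : Claim_equal_solution := by
  intro t k _ pre
  obtain ⟨hne, hk0, hside⟩ := pre
  show solution t k = solution_alt t k
  rw [show solution_alt t k = altLoop t k from rfl,
    main_B k.toNat t k rfl hk0]
  exact main_A k.toNat t k rfl hk0 hne hside
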